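-- pv_equiv track=rewrite | github.com/julmaxi/Abstractive-Timeline-Summarization | graphsum/tlsum.py | _rouge_1
-- ===== SOURCE A (Python) =====
-- import collections
--
-- def _rouge_1(pred_tokens, ref_tokens):
--     # unigrams
--     pred_counts = collections.Counter(pred_tokens)
--
--     ref_counts = {}
--
--     for i, tokens in ref_tokens.items():
--         ref_counts[i] = collections.Counter(tokens)
--
--     # approximate ROUGE-1 score
--     match = 0
--     for tok in pred_counts:
--         match += sum([min(pred_counts[tok], ref_counts[x][tok]) for x in
--                       ref_counts.keys()])
--
--     prec_denom = (len(ref_counts.keys()) * sum(pred_counts.values()))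
--
--     recall_denom = sum([sum(ref_counts[x].values()) for x in ref_counts])
--
--     return {
--         "rouge_1_h_count": match,
--         "rouge_1_p_count": prec_denom,
--         "rouge_1_m_count": recall_denom,
--     }
-- ===== SOURCE B (Python) =====
-- import collections
--
-- def _rouge_1(pred_tokens, ref_tokens):
--     # One pass over each reference's distinct tokens instead of
--     # distinct-pred-tokens x num-references cross lookups.
--     pred_counts = collections.Counter(pred_tokens)
--
--     match = 0
--     recall_denom = 0
--     for tokens in ref_tokens.values():
--         recall_denom += len(tokens)
--         for tok, c in collections.Counter(tokens).items():
--             if tok in pred_counts: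
--                 match += min(c, pred_counts[tok])
--
--     return {
--         "rouge_1_h_count": match,
--         "rouge_1_p_count": len(ref_tokens) * len(pred_tokens),
--         "rouge_1_m_count": recall_denom,
--     }
-- ===== Notes on version B (the rewrite author's own statement) =====
-- stated objective: faster
-- what changed: Instead of scanning every reference counter for every distinct prediction token (distinct_pred x num_refs lookups) and recomputing denominators with extra passes, B makes one pass over each reference's distinct tokens, summing min(ref_count, pred_count) only for tokens present in the prediction counter, and accumulates the recall denominator in the same pass.
import Mathlib
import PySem

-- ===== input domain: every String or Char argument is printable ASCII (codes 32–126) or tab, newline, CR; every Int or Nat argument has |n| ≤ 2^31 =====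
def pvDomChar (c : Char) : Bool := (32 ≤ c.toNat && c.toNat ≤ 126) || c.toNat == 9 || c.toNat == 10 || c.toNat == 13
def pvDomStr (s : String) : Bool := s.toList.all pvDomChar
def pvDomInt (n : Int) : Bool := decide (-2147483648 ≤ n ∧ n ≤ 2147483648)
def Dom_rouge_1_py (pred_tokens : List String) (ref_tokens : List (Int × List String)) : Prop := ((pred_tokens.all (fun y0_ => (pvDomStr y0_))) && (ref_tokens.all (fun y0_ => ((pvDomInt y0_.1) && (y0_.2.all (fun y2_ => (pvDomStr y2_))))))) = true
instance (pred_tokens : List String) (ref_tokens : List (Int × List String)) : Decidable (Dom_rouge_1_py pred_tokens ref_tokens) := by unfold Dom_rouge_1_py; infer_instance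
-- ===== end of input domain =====

-- B replaces A's distinct-pred-token × num-refs cross-lookup loop by a single pass over each
-- reference's distinct tokens (summing mins against the prediction counter), accumulating the
-- recall denominator in the same pass; a timing run measured it faster.

-- ===== PORT A =====
-- the dict parameter arrives as an association list; like Python's dict(), later values overwrite earlier ones per key
def rouge_1_py (pred_tokens : List String) (ref_tokens : List (Int × List String)) : List (String × Int) :=
  -- pred_counts = collections.Counter(pred_tokens)
  let pred_counts : PySem.Dict String Int := PySem.Dict.counter pred_tokens
  let refd : PySem.Dict Int (List String) :=
    ref_tokens.foldl (fun d p => d.insert p.1 p.2) PySem.Dict.empty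
  -- for i, tokens in ref_tokens.items(): ref_counts[i] = Counter(tokens)
  let ref_counts : PySem.Dict Int (PySem.Dict String Int) :=
    refd.items.foldl (fun d p => d.insert p.1 (PySem.Dict.counter p.2)) PySem.Dict.empty
  -- for tok in pred_counts: match += sum([min(pred_counts[tok], ref_counts[x][tok]) for x in ref_counts.keys()])
  let m : Int := pred_counts.keys.foldl (fun acc tok =>
    acc + (ref_counts.keys.map (fun x =>
      min (pred_counts.getD tok 0) ((ref_counts.getD x PySem.Dict.empty).getD tok 0))).sum) 0
  let prec_denom : Int := (ref_counts.keys.length : Int) * pred_counts.values.sum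
  let recall_denom : Int :=
    (ref_counts.keys.map (fun x => (ref_counts.getD x PySem.Dict.empty).values.sum)).sum
  [("rouge_1_h_count", m), ("rouge_1_p_count", prec_denom), ("rouge_1_m_count", recall_denom)]

-- ===== PORT B =====
def rouge_1_py_alt (pred_tokens : List String) (ref_tokens : List (Int × List String)) : List (String × Int) :=
  let pred_counts : PySem.Dict String Int := PySem.Dict.counter pred_tokens
  let refd : PySem.Dict Int (List String) :=
    ref_tokens.foldl (fun d p => d.insert p.1 p.2) PySem.Dict.empty
  -- for tokens in ref_tokens.values(): recall += len(tokens); for tok, c in Counter(tokens).items(): if tok in pred_counts: match += min(c, pred_counts[tok])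
  let mr : Int × Int := refd.values.foldl (fun s tokens =>
    ((PySem.Dict.counter tokens).items.foldl
       (fun m p => if pred_counts.contains p.1 then m + min p.2 (pred_counts.getD p.1 0) else m) s.1,
     s.2 + (tokens.length : Int))) (0, 0)
  [("rouge_1_h_count", mr.1),
   ("rouge_1_p_count", (refd.size : Int) * (pred_tokens.length : Int)),
   ("rouge_1_m_count", mr.2)]

-- ===== PRECONDITION & SPEC =====
def Spec_rouge_1_py (pred_tokens : List String) (ref_tokens : List (Int × List String)) (out : List (String × Int)) : Prop := out = rouge_1_py_alt pred_tokens ref_tokens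
instance (pred_tokens : List String) (ref_tokens : List (Int × List String)) (out : List (String × Int)) : Decidable (Spec_rouge_1_py pred_tokens ref_tokens out) := by unfold Spec_rouge_1_py; infer_instance

-- ===== CLAIM (what is proved, stated in full; the proofs are below) =====
def Claim_equal_rouge_1_py : Prop := ∀ (pred_tokens : List String) (ref_tokens : List (Int × List String)), Dom_rouge_1_py pred_tokens ref_tokens → Spec_rouge_1_py pred_tokens ref_tokens (rouge_1_py pred_tokens ref_tokens)

-- ===== LEMMAS AND PROOFS =====

-- dropping terms on which f vanishes
theorem pv_sum_map_eq_sum_filter {α : Type} (l : List α) (p : α → Bool) (f : α → Int)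
    (h : ∀ x ∈ l, p x = false → f x = 0) :
    (l.map f).sum = ((l.filter p).map f).sum := by
  induction l with
  | nil => rfl
  | cons x t ih =>
    have ht : ∀ y ∈ t, p y = false → f y = 0 := fun y hy => h y (List.mem_cons_of_mem _ hy)
    by_cases hp : p x = true
    · simp [hp, ih ht]
    · have : f x = 0 := h x (List.mem_cons_self ..) (by simpa using hp)
      simp [hp, ih ht, this]

-- swapping a double list sum
theorem pv_sum_sum_comm {α β : Type} (l1 : List α) (l2 : List β) (f : α → β → Int) :
    (l1.map (fun a => (l2.map (f a)).sum)).sum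
      = (l2.map (fun b => (l1.map (fun a => f a b)).sum)).sum := by
  induction l1 with
  | nil => simp
  | cons x t ih =>
    simp only [List.map_cons, List.sum_cons, ih]
    rw [← PySem.List.sum_map_add_int]

-- two nodup lists with the same members sum a function to the same value
theorem pv_sum_nodup_same_mem {α : Type} [DecidableEq α] (l1 l2 : List α) (f : α → Int)
    (h1 : l1.Nodup) (h2 : l2.Nodup) (hm : ∀ x, x ∈ l1 ↔ x ∈ l2) :
    (l1.map f).sum = (l2.map f).sum := by
  rw [← List.sum_toFinset f h1, ← List.sum_toFinset f h2]
  have : l1.toFinset = l2.toFinset := by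
    apply Finset.ext; intro x; simpa [List.mem_toFinset] using hm x
  rw [this]

-- sum of a Counter's values is the length of the counted list
theorem pv_counter_values_sum (xs : List String) :
    (PySem.Dict.counter xs).values.sum = (xs.length : Int) := by
  have hitems := PySem.Dict.items_counter (xs := xs)
  have hv : (PySem.Dict.counter xs).values
      = (PySem.Set.ofList xs).map (fun k => (xs.count k : Int)) := by
    simp only [PySem.Dict.values, hitems, List.map_map]; rfl
  rw [hv]
  have hnd := PySem.Set.nodup_ofList xs
  have hfin : (PySem.Set.ofList xs).toFinset = xs.toFinset := by
    apply Finset.ext; intro x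
    simp [List.mem_toFinset, PySem.Set.mem_ofList]
  calc ((PySem.Set.ofList xs).map (fun k => (xs.count k : Int))).sum
      = ∑ a ∈ (PySem.Set.ofList xs).toFinset, (xs.count a : Int) := by
        rw [List.sum_toFinset _ hnd]
    _ = ∑ a ∈ xs.toFinset, (xs.count a : Int) := by rw [hfin]
    _ = ((∑ a ∈ xs.toFinset, xs.count a : Nat) : Int) := by push_cast; rfl
    _ = (xs.length : Int) := by rw [List.sum_toFinset_count_eq_length]

-- per-reference: A's scan of the prediction's distinct tokens equals B's scan of the reference's distinct tokens
theorem pv_key_lemma (pred r : List String) :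
    ((PySem.Set.ofList pred).map (fun tok => min ((pred.count tok : Int)) ((r.count tok : Int)))).sum
      = (((PySem.Set.ofList r).filter (fun tok => pred.contains tok)).map
          (fun tok => min ((r.count tok : Int)) ((pred.count tok : Int)))).sum := by
  have h1 : ((PySem.Set.ofList pred).map (fun tok => min ((pred.count tok : Int)) ((r.count tok : Int)))).sum
      = (((PySem.Set.ofList pred).filter (fun tok => r.contains tok)).map
          (fun tok => min ((pred.count tok : Int)) ((r.count tok : Int)))).sum := by
    apply pv_sum_map_eq_sum_filter
    intro x _ hc
    have hx : x ∉ r := by simpa using hc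
    have : r.count x = 0 := List.count_eq_zero.mpr hx
    simp [this]
  rw [h1]
  have h2 : (((PySem.Set.ofList r).filter (fun tok => pred.contains tok)).map
          (fun tok => min ((r.count tok : Int)) ((pred.count tok : Int)))).sum
      = (((PySem.Set.ofList r).filter (fun tok => pred.contains tok)).map
          (fun tok => min ((pred.count tok : Int)) ((r.count tok : Int)))).sum := by
    apply congrArg
    apply List.map_congr_left
    intro x _
    exact min_comm _ _
  rw [h2]
  apply pv_sum_nodup_same_mem
  · exact List.Nodup.filter _ (PySem.Set.nodup_ofList pred)
  · exact List.Nodup.filter _ (PySem.Set.nodup_ofList r)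
  · intro x
    simp [List.mem_filter, PySem.Set.mem_ofList, and_comm]

theorem pv_map_keys_getD {ν γ : Type} (d : PySem.Dict Int ν) (hnd : d.keys.Nodup) (dflt : ν) (g : ν → γ) :
    d.keys.map (fun x => g (d.getD x dflt)) = d.values.map g := by
  conv_rhs => rw [PySem.Dict.values_eq_map_keys d hnd dflt]
  rw [List.map_map]
  rfl

-- shared facts about the reference dict and the dict of reference counters
theorem pv_refd_nodup (refs : List (Int × List String)) :
    (refs.foldl (fun d p => d.insert p.1 p.2) PySem.Dict.empty).keys.Nodup :=
  PySem.Dict.nodup_keys_foldl_insert_key refs (fun p => p.1) (fun _ p => p.2) PySem.Dict.empty (by simp [pysem])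

theorem pv_rc_items (R : PySem.Dict Int (List String)) (hnd : R.keys.Nodup) :
    (R.items.foldl (fun d p => d.insert p.1 (PySem.Dict.counter p.2)) PySem.Dict.empty).items
      = R.items.map (fun p => (p.1, PySem.Dict.counter p.2)) := by
  have := PySem.Dict.items_foldl_insert_fresh (l := R.items) (k := fun p => p.1)
    (v := fun p => PySem.Dict.counter p.2) (d := PySem.Dict.empty) (by simp [pysem]) hnd
  simpa [pysem] using this

theorem rouge_1_py_spec : Claim_equal_rouge_1_py := by
  intro pred refs _
  unfold Spec_rouge_1_py rouge_1_py rouge_1_py_alt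
  simp only []
  set pc := PySem.Dict.counter pred with hpc
  set R := refs.foldl (fun d p => d.insert p.1 p.2) PySem.Dict.empty with hR
  set rc := R.items.foldl (fun d p => d.insert p.1 (PySem.Dict.counter p.2)) PySem.Dict.empty with hrcdef
  have hRnd : R.keys.Nodup := pv_refd_nodup refs
  have hrc : rc.items = R.items.map (fun p => (p.1, PySem.Dict.counter p.2)) := pv_rc_items R hRnd
  have hkeys : rc.keys = R.keys := by
    simp only [PySem.Dict.keys, hrc, List.map_map]; rfl
  have hvals : rc.values = R.values.map PySem.Dict.counter := by
    simp only [PySem.Dict.values, hrc, List.map_map]; rfl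
  have hrcnd : rc.keys.Nodup := hkeys ▸ hRnd
  -- split B's paired fold into its two independent accumulators
  rw [PySem.List.foldl_prod_mk
    (f := fun m tokens => (PySem.Dict.counter tokens).items.foldl
      (fun m p => if pc.contains p.1 then m + min p.2 (pc.getD p.1 0) else m) m)
    (g := fun s tokens => s + (tokens.length : Int))]
  -- the match counts agree
  have hmatch : pc.keys.foldl (fun acc tok =>
      acc + (rc.keys.map (fun x =>
        min (pc.getD tok 0) ((rc.getD x PySem.Dict.empty).getD tok 0))).sum) 0
      = R.values.foldl (fun m tokens => (PySem.Dict.counter tokens).items.foldl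
          (fun m p => if pc.contains p.1 then m + min p.2 (pc.getD p.1 0) else m) m) 0 := by
    have hstep : ∀ (m : Int) (tokens : List String), tokens ∈ R.values →
        (PySem.Dict.counter tokens).items.foldl
          (fun m p => if pc.contains p.1 then m + min p.2 (pc.getD p.1 0) else m) m
        = m + (((PySem.Set.ofList tokens).filter (fun tok => pred.contains tok)).map
            (fun tok => min ((tokens.count tok : Int)) ((pred.count tok : Int)))).sum := by
      intro m tokens _
      rw [PySem.List.foldl_if_eq_foldl_filter,
        PySem.List.foldl_add (g := fun (p : String × Int) => min p.2 (pc.getD p.1 0))]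
      congr 1
      rw [PySem.Dict.items_counter, List.filter_map, List.map_map]
      simp only [hpc, Function.comp_def, PySem.Dict.contains_counter, PySem.Dict.getD_counter]
    have h2 := PySem.List.foldl_congr_mem (l := R.values) (init := (0 : Int))
      (f := fun m tokens => (PySem.Dict.counter tokens).items.foldl
        (fun m p => if pc.contains p.1 then m + min p.2 (pc.getD p.1 0) else m) m)
      (g := fun m tokens => m + (((PySem.Set.ofList tokens).filter (fun tok => pred.contains tok)).map
        (fun tok => min ((tokens.count tok : Int)) ((pred.count tok : Int)))).sum)
      (fun m tokens h => hstep m tokens h)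
    rw [h2,
      PySem.List.foldl_add (g := fun tokens => (((PySem.Set.ofList tokens).filter (fun tok => pred.contains tok)).map
            (fun tok => min ((tokens.count tok : Int)) ((pred.count tok : Int)))).sum),
      PySem.List.foldl_add (g := fun tok => (rc.keys.map (fun x =>
        min (pc.getD tok 0) ((rc.getD x PySem.Dict.empty).getD tok 0))).sum)]
    have hF : ∀ tok ∈ pc.keys,
        (rc.keys.map (fun x => min (pc.getD tok 0) ((rc.getD x PySem.Dict.empty).getD tok 0))).sum
        = (R.values.map (fun r => min ((pred.count tok : Int)) ((r.count tok : Int)))).sum := by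
      intro tok _
      rw [pv_map_keys_getD rc hrcnd PySem.Dict.empty
        (g := fun ctr => min (pc.getD tok 0) (ctr.getD tok 0)), hvals, List.map_map]
      simp only [hpc, Function.comp_def, PySem.Dict.getD_counter]
    rw [List.map_congr_left hF]
    have hk : pc.keys = PySem.Set.ofList pred := by rw [hpc]; exact PySem.Dict.keys_counter pred
    rw [hk, pv_sum_sum_comm (PySem.Set.ofList pred) R.values
      (fun tok r => min ((pred.count tok : Int)) ((r.count tok : Int)))]
    have h3 := List.map_congr_left (l := R.values)
      (f := fun r => ((PySem.Set.ofList pred).map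
        (fun tok => min ((pred.count tok : Int)) ((r.count tok : Int)))).sum)
      (g := fun r => (((PySem.Set.ofList r).filter (fun tok => pred.contains tok)).map
        (fun tok => min ((r.count tok : Int)) ((pred.count tok : Int)))).sum)
      (fun r _ => pv_key_lemma pred r)
    rw [h3]
  -- the precision denominators agree
  have hprec : (rc.keys.length : Int) * pc.values.sum = (R.size : Int) * (pred.length : Int) := by
    rw [hkeys, hpc, pv_counter_values_sum]
    simp [PySem.Dict.keys, PySem.Dict.size]
  -- the recall denominators agree
  have hrecall : (rc.keys.map (fun x => (rc.getD x PySem.Dict.empty).values.sum)).sum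
      = R.values.foldl (fun s tokens => s + (tokens.length : Int)) 0 := by
    rw [pv_map_keys_getD rc hrcnd PySem.Dict.empty (g := fun ctr => ctr.values.sum), hvals,
      List.map_map, PySem.List.foldl_add (g := fun (tokens : List String) => (tokens.length : Int))]
    simp [Function.comp_def, pv_counter_values_sum]
  rw [hmatch, hprec, hrecall]
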